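-- pv_equiv track=rewrite | github.com/TalOrenshtein/social_media_api_demo | api/v1/utils.py | is_sorted_by_char
-- ===== SOURCE A (Python) =====
-- def is_sorted_by_char(arr:list,char:str):
--     r'''
--     check if the elements in arr are sorted by the number of appearences of char.
--     :param list arr: a list with str values
--     :param str char: an ABC character.
--     :returns: results that indicates if arr is sorted or not.
--     '''
--     if len(char)!=1:
--         raise ValueError('char arg is not a char.')
--     count_arr=[]
--     for i in range(len(arr)):
--         if not isinstance(arr[i],str):
--             raise ValueError("arr's arg elements are not of type 'str'")
--         count_arr.insert(i,arr[i].count(char))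
--     for i in range(1,len(count_arr)):
--         if count_arr[i-1]>count_arr[i]:
--             return False
--     return True
-- ===== SOURCE B (Python) =====
-- def is_sorted_by_char(arr, char):
--     if len(char) != 1:
--         raise ValueError('char arg is not a char.')
--     for x in arr:
--         if not isinstance(x, str):
--             raise ValueError("arr's arg elements are not of type 'str'")
--     count_arr = [x.count(char) for x in arr]
--     return count_arr == sorted(count_arr)
-- ===== Notes on version B (the rewrite author's own statement) =====
-- stated objective: idiomatic
-- what changed: B builds the counts with a comprehension and decides sortedness by comparing the counts list with its sorted copy, instead of A's index-based insert loop and pairwise adjacent-comparison loop with an early return.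
-- outside the precondition, e.g. on is_sorted_by_char(['a'], 'ab'): A raises ValueError, B raises ValueError
import Mathlib
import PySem

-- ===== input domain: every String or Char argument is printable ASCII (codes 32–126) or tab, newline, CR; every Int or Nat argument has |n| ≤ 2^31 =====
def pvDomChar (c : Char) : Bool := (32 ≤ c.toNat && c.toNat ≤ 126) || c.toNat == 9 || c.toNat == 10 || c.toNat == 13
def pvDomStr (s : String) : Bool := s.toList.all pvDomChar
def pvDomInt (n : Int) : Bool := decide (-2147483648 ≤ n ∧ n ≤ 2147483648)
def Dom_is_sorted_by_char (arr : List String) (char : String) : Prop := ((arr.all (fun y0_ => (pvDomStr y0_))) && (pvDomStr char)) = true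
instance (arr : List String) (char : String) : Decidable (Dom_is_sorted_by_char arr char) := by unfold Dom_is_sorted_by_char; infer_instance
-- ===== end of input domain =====

-- B replaces A's index-insert loop and pairwise early-return scan by a comprehension plus a
-- sorted-copy comparison (idiomatic; return value only — neither mutates its arguments).

-- ===== PORT A =====
def is_sorted_by_char (arr : List String) (char : String) : Bool :=
  if PySem.Str.len char ≠ 1 then false   -- Python raises ValueError here; excluded by Pre_
  else
    -- arr's elements are Lean Strings, so A's isinstance check never raises on this domain
    let count_arr : List Nat :=
      (PySem.List.pyRange 0 (PySem.List.len arr)).foldl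
        (fun acc i => PySem.List.insert acc i (PySem.Str.count (PySem.List.pyGetD arr i "") char)) []
    (PySem.List.pyRange 1 (PySem.List.len count_arr)).all
      (fun i => ! decide (PySem.List.pyGetD count_arr (i-1) 0 > PySem.List.pyGetD count_arr i 0))

-- ===== PORT B =====
def is_sorted_by_char_alt (arr : List String) (char : String) : Bool :=
  if PySem.Str.len char ≠ 1 then false   -- Python raises ValueError here; excluded by Pre_
  else
    let count_arr : List Nat := arr.map (fun x => PySem.Str.count x char)
    count_arr == PySem.List.sorted count_arr (fun c => c)

-- ===== PRECONDITION & SPEC =====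
-- Pre_ excludes exactly the inputs where A (and B) raise ValueError: char not a single character.
def Pre_is_sorted_by_char (arr : List String) (char : String) : Prop :=
  PySem.Str.len char = 1
instance (arr : List String) (char : String) : Decidable (Pre_is_sorted_by_char arr char) := by
  unfold Pre_is_sorted_by_char; infer_instance
def pvWitness_is_sorted_by_char : List String × String := (["ab", "b", "bb"], "b")

def Spec_is_sorted_by_char (arr : List String) (char : String) (out : Bool) : Prop := out = is_sorted_by_char_alt arr char
instance (arr : List String) (char : String) (out : Bool) : Decidable (Spec_is_sorted_by_char arr char out) := by unfold Spec_is_sorted_by_char; infer_instance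

-- ===== CLAIM (what is proved, stated in full; the proofs are below) =====
def Claim_equal_is_sorted_by_char : Prop := ∀ (arr : List String) (char : String), Dom_is_sorted_by_char arr char → Pre_is_sorted_by_char arr char → Spec_is_sorted_by_char arr char (is_sorted_by_char arr char)

-- ===== LEMMAS AND PROOFS =====

-- list.insert at the current length appends
theorem pv_insert_length {α : Type} (l : List α) (x : α) :
    PySem.List.insert l (l.length : Int) x = l ++ [x] := by
  have h : ¬ ((l.length : Int) < 0) := by omega
  simp [PySem.List.insert, PySem.List.sliceIndices, h]

theorem pv_length_pyRange_zero (m : Nat) :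
    (PySem.List.pyRange 0 (m : Int)).length = m := by
  induction m with
  | zero => decide
  | succ k ih =>
      have : ((k + 1 : Nat) : Int) = (k : Int) + 1 := by push_cast; ring
      rw [this, PySem.List.pyRange_one_succ_right (by positivity)]
      simp [ih]

-- A's first loop builds the list of f i for i in range(n)
theorem pv_build (f : Int → Nat) (m : Nat) :
    (PySem.List.pyRange 0 (m : Int)).foldl
      (fun acc i => PySem.List.insert acc i (f i)) []
    = (PySem.List.pyRange 0 (m : Int)).map f := by
  induction m with
  | zero =>
      have h0 : PySem.List.pyRange 0 ((0:Nat) : Int) = [] := by decide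
      rw [h0]; rfl
  | succ k ih =>
      have hc : ((k + 1 : Nat) : Int) = (k : Int) + 1 := by push_cast; ring
      rw [hc, PySem.List.pyRange_one_succ_right (by positivity)]
      rw [List.foldl_append, List.map_append, ih]
      simp only [List.foldl_cons, List.foldl_nil, List.map_cons, List.map_nil]
      have hlen : ((PySem.List.pyRange 0 (k : Int)).map f).length = k := by
        simp [pv_length_pyRange_zero k]
      calc PySem.List.insert ((PySem.List.pyRange 0 (k : Int)).map f) (k : Int) (f k)
          = PySem.List.insert ((PySem.List.pyRange 0 (k : Int)).map f)
              (((PySem.List.pyRange 0 (k : Int)).map f).length : Int) (f k) := by rw [hlen]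
        _ = (PySem.List.pyRange 0 (k : Int)).map f ++ [f k] := pv_insert_length _ _

-- A's second loop decides adjacent-nondecreasing, i.e. Pairwise (· ≤ ·)
theorem pv_scan (l : List Nat) :
    ((PySem.List.pyRange 1 (PySem.List.len l)).all
      (fun i => ! decide (PySem.List.pyGetD l (i-1) 0 > PySem.List.pyGetD l i 0)))
    = decide (l.Pairwise (· ≤ ·)) := by
  have hlen : PySem.List.len l = (l.length : Int) := by simp [PySem.List.len]
  by_cases hp : l.Pairwise (· ≤ ·)
  · have hchain : List.IsChain (· ≤ ·) l := List.isChain_iff_pairwise.mpr hp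
    rw [hlen]
    simp only [hp, decide_true]
    rw [List.all_eq_true]
    intro i hi
    have hmem := PySem.List.mem_pyRange_one.mp hi
    have h0 : (0:Int) ≤ i - 1 := by omega
    have h1 : i - 1 < (l.length : Int) := by omega
    have h0' : (0:Int) ≤ i := by omega
    have h1' : i < (l.length : Int) := by omega
    rw [PySem.List.pyGetD_eq_getElem l 0 h0 h1, PySem.List.pyGetD_eq_getElem l 0 h0' h1']
    have hj : (i-1).toNat + 1 = i.toNat := by omega
    have hjl : (i-1).toNat + 1 < l.length := by omega
    have := (List.isChain_iff_getElem.mp hchain) (i-1).toNat hjl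
    have hrw : l[i.toNat] = l[(i-1).toNat + 1]'(by omega) := by
      congr 1; omega
    rw [hrw]
    simpa using this
  · have hchain : ¬ List.IsChain (· ≤ ·) l := fun h => hp (List.isChain_iff_pairwise.mp h)
    rw [List.isChain_iff_getElem] at hchain
    push Not at hchain
    obtain ⟨j, hj, hlt⟩ := hchain
    rw [hlen]
    simp only [hp, decide_false]
    rw [List.all_eq_false]
    refine ⟨((j:Int) + 1), ?_, ?_⟩
    · exact PySem.List.mem_pyRange_one.mpr (by omega)
    · have h0 : (0:Int) ≤ (j:Int) + 1 - 1 := by omega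
      have h1 : (j:Int) + 1 - 1 < (l.length : Int) := by omega
      have h0' : (0:Int) ≤ (j:Int) + 1 := by omega
      have h1' : (j:Int) + 1 < (l.length : Int) := by omega
      rw [PySem.List.pyGetD_eq_getElem l 0 h0 h1, PySem.List.pyGetD_eq_getElem l 0 h0' h1']
      have e1 : ((j:Int) + 1 - 1).toNat = j := by omega
      have e2 : ((j:Int) + 1).toNat = j + 1 := by omega
      simp only [e1, e2]
      simp
      omega

-- B's comparison with the sorted copy decides the same predicate
theorem pv_sortcmp (l : List Nat) :
    (l == PySem.List.sorted l (fun c => c)) = decide (l.Pairwise (· ≤ ·)) := by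
  by_cases hp : l.Pairwise (· ≤ ·)
  · have : PySem.List.sorted l (fun c => c) = l :=
      PySem.List.sorted_eq_self_of_pairwise l (fun c => c) (by simpa using hp)
    simp [this, hp]
  · simp only [hp, decide_false, beq_eq_false_iff_ne, ne_eq]
    intro he
    exact hp (by simpa using (he ▸ PySem.List.sorted_pairwise l (fun c => c)))

-- ===== VERDICT (by name: the statement is the Claim_ definition above) =====
theorem is_sorted_by_char_spec : Claim_equal_is_sorted_by_char := by
  intro arr char _ hpre
  unfold Spec_is_sorted_by_char is_sorted_by_char is_sorted_by_char_alt
  rw [if_neg (fun h => h hpre), if_neg (fun h => h hpre)]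
  have hlen : PySem.List.len arr = (arr.length : Int) := by simp [PySem.List.len]
  have hbuild :
      (PySem.List.pyRange 0 (PySem.List.len arr)).foldl
        (fun acc i => PySem.List.insert acc i (PySem.Str.count (PySem.List.pyGetD arr i "") char)) []
      = arr.map (fun x => PySem.Str.count x char) := by
    rw [hlen, pv_build (fun i => PySem.Str.count (PySem.List.pyGetD arr i "") char) arr.length]
    have : (PySem.List.pyRange 0 ((arr.length : Int))).map
        (fun i => PySem.Str.count (PySem.List.pyGetD arr i "") char)
        = ((PySem.List.pyRange 0 ((arr.length : Int))).map (fun i => PySem.List.pyGetD arr i "")).map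
            (fun x => PySem.Str.count x char) := by
      rw [List.map_map]; rfl
    rw [this]
    have := PySem.List.map_pyGetD_pyRange_zero arr ""
    rw [show PySem.List.len arr = (arr.length : Int) from hlen] at this
    rw [this]
  simp only [hbuild]
  rw [pv_scan, pv_sortcmp]
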